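-- pv_equiv track=rewrite | github.com/HarshaVippala/ResumeForge | backend/services/human_natural_generator.py | _truncate_skills_naturally
-- ===== SOURCE A (Python) =====
-- def _truncate_skills_naturally(skills_text: str, max_chars: int) -> str:
--     """Truncate skills while preserving natural grouping"""
--
--     if len(skills_text) <= max_chars:
--         return skills_text
--
--     # Split by commas and truncate
--     skills = [skill.strip() for skill in skills_text.split(',')]
--     truncated = []
--     current_length = 0
--
--     for skill in skills:
--         # Account for comma and space
--         needed_length = len(skill) + (2 if truncated else 0)
--
--         if current_length + needed_length <= max_chars:
--             truncated.append(skill)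
--             current_length += needed_length
--         else:
--             break
--
--     return ', '.join(truncated)
-- ===== SOURCE B (Python) =====
-- def _truncate_skills_naturally(skills_text: str, max_chars: int) -> str:
--     """Truncate skills while preserving natural grouping"""
--
--     if len(skills_text) <= max_chars:
--         return skills_text
--
--     skills = [skill.strip() for skill in skills_text.split(',')]
--     best = ''
--     for k in range(1, len(skills) + 1):
--         candidate = ', '.join(skills[:k])
--         if len(candidate) <= max_chars:
--             best = candidate
--         else:
--             break
--     return best
-- ===== Notes on version B (the rewrite author's own statement) =====
-- stated objective: simpler
-- what changed: Replaces A's manual running-length accumulator with +2 comma/space accounting by directly joining growing prefixes and keeping the last prefix whose joined length fits, breaking at the first that does not.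
import Mathlib
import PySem

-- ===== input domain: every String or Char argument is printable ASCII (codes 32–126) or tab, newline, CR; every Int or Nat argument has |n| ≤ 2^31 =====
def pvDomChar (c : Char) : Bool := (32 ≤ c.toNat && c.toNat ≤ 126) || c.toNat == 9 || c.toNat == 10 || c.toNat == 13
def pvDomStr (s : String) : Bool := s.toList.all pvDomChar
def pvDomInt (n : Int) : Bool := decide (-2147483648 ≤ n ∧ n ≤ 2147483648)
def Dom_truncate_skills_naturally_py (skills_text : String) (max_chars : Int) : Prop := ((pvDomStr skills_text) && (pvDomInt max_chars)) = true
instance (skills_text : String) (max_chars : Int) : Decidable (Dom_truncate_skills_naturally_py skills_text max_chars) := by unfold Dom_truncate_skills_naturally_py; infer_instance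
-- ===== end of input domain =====

-- B keeps the last fitting ", "-joined prefix instead of threading a running length with manual +2 accounting; objective: simpler.

-- ===== PORT A =====
-- the for-loop over skills with early break; state = (truncated, current_length)
def pvALoop (mx : Int) : List String → List String → Int → List String
  | [], truncated, _ => truncated
  | skill :: rest, truncated, current_length =>
    let needed : Int := PySem.Str.len skill + (if truncated = [] then 0 else 2)
    if current_length + needed ≤ mx then
      pvALoop mx rest (truncated ++ [skill]) (current_length + needed)
    else truncated

def truncate_skills_naturally_py (skills_text : String) (max_chars : Int) : String :=
  if (PySem.Str.len skills_text : Int) ≤ max_chars then skills_text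
  else
    -- s.split(',') with a nonempty separator never fails: split? is always `some`, getD [] is exact
    let skills := ((PySem.Str.split? skills_text ",").getD []).map PySem.Str.strip
    PySem.Str.join ", " (pvALoop max_chars skills [] 0)

-- ===== PORT B =====
-- the for-loop over k in range(1, len(skills)+1); state = best, early break
def pvBLoop (skills : List String) (mx : Int) : List Int → String → String
  | [], best => best
  | k :: ks, best =>
    let candidate := PySem.Str.join ", " (PySem.List.slice skills none (some k))
    if (PySem.Str.len candidate : Int) ≤ mx then pvBLoop skills mx ks candidate
    else best

def truncate_skills_naturally_py_alt (skills_text : String) (max_chars : Int) : String :=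
  if (PySem.Str.len skills_text : Int) ≤ max_chars then skills_text
  else
    -- s.split(',') with a nonempty separator never fails: split? is always `some`, getD [] is exact
    let skills := ((PySem.Str.split? skills_text ",").getD []).map PySem.Str.strip
    pvBLoop skills max_chars (PySem.List.pyRange 1 ((skills.length : Int) + 1) 1) ""

-- ===== PRECONDITION & SPEC =====
def Spec_truncate_skills_naturally_py (skills_text : String) (max_chars : Int) (out : String) : Prop := out = truncate_skills_naturally_py_alt skills_text max_chars
instance (skills_text : String) (max_chars : Int) (out : String) : Decidable (Spec_truncate_skills_naturally_py skills_text max_chars out) := by unfold Spec_truncate_skills_naturally_py; infer_instance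

-- ===== CLAIM (what is proved, stated in full; the proofs are below) =====
def Claim_equal_truncate_skills_naturally_py : Prop := ∀ (skills_text : String) (max_chars : Int), Dom_truncate_skills_naturally_py skills_text max_chars → Spec_truncate_skills_naturally_py skills_text max_chars (truncate_skills_naturally_py skills_text max_chars)

-- ===== LEMMAS AND PROOFS =====

theorem pv_chars_len_join_append (sep : List Char) (L : List (List Char)) (t : List Char) :
    (PySem.Chars.join sep (L ++ [t])).length
      = (PySem.Chars.join sep L).length + t.length + (if L = [] then 0 else sep.length) := by
  induction L with
  | nil => simp [PySem.Chars.join_singleton, PySem.Chars.join_nil]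
  | cons p L' ih =>
    cases L' with
    | nil => simp [PySem.Chars.join_cons_cons, PySem.Chars.join_singleton]; omega
    | cons q L'' =>
      have h1 : (p :: q :: L'') ++ [t] = p :: ((q :: L'') ++ [t]) := rfl
      have h2 : (q :: L'') ++ [t] = q :: (L'' ++ [t]) := rfl
      rw [h1, h2, PySem.Chars.join_cons_cons, PySem.Chars.join_cons_cons, ← h2]
      simp only [List.length_append, ih]
      simp
      omega

-- length of a ", "-join grows by len s (+2 if nonempty) when appending s
theorem pv_len_join_append (acc : List String) (s : String) :
    (PySem.Str.len (PySem.Str.join ", " (acc ++ [s])) : Int)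
      = PySem.Str.len (PySem.Str.join ", " acc) + PySem.Str.len s
        + (if acc = [] then 0 else 2) := by
  rw [PySem.Str.len_eq, PySem.Str.len_eq, PySem.Str.len_eq, PySem.Str.toList_join,
      PySem.Str.toList_join, List.map_append]
  have := pv_chars_len_join_append (", ".toList) (acc.map String.toList) s.toList
  simp only [List.map_eq_nil_iff] at this
  simp only [List.map_singleton]
  rw [this]
  split_ifs <;> simp [List.length_cons]

-- the two loops agree on every split point
theorem pv_loop_eq (mx : Int) (rest acc : List String) :
    pvBLoop (acc ++ rest) mx
        (PySem.List.pyRange ((acc.length : Int) + 1) (((acc ++ rest).length : Int) + 1) 1)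
        (PySem.Str.join ", " acc)
      = PySem.Str.join ", " (pvALoop mx rest acc (PySem.Str.len (PySem.Str.join ", " acc))) := by
  induction rest generalizing acc with
  | nil =>
    rw [PySem.List.pyRange_one_eq_nil (by simp)]
    simp [pvBLoop, pvALoop]
  | cons s rest ih =>
    rw [PySem.List.pyRange_one_cons (by simp)]
    unfold pvBLoop pvALoop
    have htake : PySem.List.slice (acc ++ s :: rest) none (some ((acc.length : Int) + 1))
        = acc ++ [s] := by
      have : ((acc.length : Int) + 1) = ((acc.length + 1 : ℕ) : Int) := by push_cast; ring
      rw [this, PySem.List.slice_to_natCast]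
      rw [show acc.length + 1 = acc.length + 1 from rfl]
      rw [List.take_append]
      simp
    rw [htake]
    have hcond : (PySem.Str.len (PySem.Str.join ", " (acc ++ [s])) : Int)
        = PySem.Str.len (PySem.Str.join ", " acc)
          + (PySem.Str.len s + (if acc = [] then 0 else 2)) := by
      rw [pv_len_join_append]; ring
    by_cases h : PySem.Str.len (PySem.Str.join ", " acc)
        + (PySem.Str.len s + (if acc = [] then 0 else 2)) ≤ mx
    · rw [if_pos (by rw [hcond]; exact h), if_pos h]
      have := ih (acc ++ [s])
      simp only [List.append_assoc, List.singleton_append, List.length_append,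
        List.length_singleton] at this ⊢
      rw [show ((acc.length : Int) + 1) + 1 = ((acc.length + 1 : ℕ) : Int) + 1 by push_cast; ring]
      rw [this, hcond]
    · rw [if_neg (by rw [hcond]; exact h), if_neg h]

-- ===== VERDICT (by name: the statement is the Claim_ definition above) =====
theorem truncate_skills_naturally_py_spec : Claim_equal_truncate_skills_naturally_py := by
  intro skills_text max_chars _
  unfold Spec_truncate_skills_naturally_py truncate_skills_naturally_py truncate_skills_naturally_py_alt
  by_cases h : (PySem.Str.len skills_text : Int) ≤ max_chars
  · simp only [h, if_true]
  · simp only [h, if_false]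
    have := pv_loop_eq max_chars
      (((PySem.Str.split? skills_text ",").getD []).map PySem.Str.strip) []
    simpa using this.symm
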